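-- pv_equiv track=rewrite | github.com/parasag1310/ACC45DAYSOFCODE-2024 | DAY-09 MONOPOLY2.py | check_monopoly
-- ===== SOURCE A (Python) =====
-- def check_monopoly(test_cases):
--     results = []
--
--     for profits in test_cases:
--         P, Q, R, S = profits
--
--         # Calculate the sum of profits of the other companies
--         sum_other_A = Q + R + S
--         sum_other_B = P + R + S
--         sum_other_C = P + Q + S
--         sum_other_D = P + Q + R
--
--         # Check for monopoly condition
--         if P > sum_other_A or Q > sum_other_B or R > sum_other_C or S > sum_other_D:
--             results.append("YES")
--         else:
--             results.append("NO")
--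
--     return results
-- ===== SOURCE B (Python) =====
-- def check_monopoly(test_cases):
--     def verdict(profits):
--         top, *rest = sorted(profits, reverse=True)
--         return "YES" if top > sum(rest) else "NO"
--     return list(map(verdict, test_cases))
-- ===== Notes on version B (the rewrite author's own statement) =====
-- stated objective: alternative
-- what changed: Per test case B sorts the four profits descending and compares the top against the sum of the rest (only the largest can dominate), mapping a helper over the cases instead of A's accumulator loop with four unrolled 'sum of the other three' comparisons.
import Mathlib
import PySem

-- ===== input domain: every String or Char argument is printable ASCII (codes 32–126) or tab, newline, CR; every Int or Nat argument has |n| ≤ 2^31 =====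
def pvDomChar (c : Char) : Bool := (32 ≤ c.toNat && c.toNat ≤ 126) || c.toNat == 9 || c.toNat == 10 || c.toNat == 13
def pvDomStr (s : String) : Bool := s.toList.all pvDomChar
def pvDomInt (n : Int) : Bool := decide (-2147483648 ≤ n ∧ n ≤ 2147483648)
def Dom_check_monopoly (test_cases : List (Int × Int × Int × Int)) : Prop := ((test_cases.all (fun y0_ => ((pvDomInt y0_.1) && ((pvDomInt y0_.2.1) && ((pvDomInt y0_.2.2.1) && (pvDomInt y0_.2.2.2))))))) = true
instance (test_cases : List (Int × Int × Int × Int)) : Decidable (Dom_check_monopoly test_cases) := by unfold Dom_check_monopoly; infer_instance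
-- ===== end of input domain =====

-- B decides each case by sorting the four profits descending and comparing the top against the sum of the rest, mapped over the cases (objective: alternative).


-- ===== PORT A =====
def check_monopoly (test_cases : List (Int × Int × Int × Int)) : List String :=
  test_cases.foldl (fun results profits =>
    let P := profits.1; let Q := profits.2.1; let R := profits.2.2.1; let S := profits.2.2.2
    let sum_other_A := Q + R + S
    let sum_other_B := P + R + S
    let sum_other_C := P + Q + S
    let sum_other_D := P + Q + R
    if P > sum_other_A ∨ Q > sum_other_B ∨ R > sum_other_C ∨ S > sum_other_D then
      results ++ ["YES"]
    else
      results ++ ["NO"]) []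

-- ===== PORT B =====
-- helper 'verdict': top, *rest = sorted(profits, reverse=True); "YES" if top > sum(rest) else "NO"
-- (the [] branch is unreachable: sorted of a 4-tuple is never empty; Python's unpack would raise there)
def monoVerdict (profits : Int × Int × Int × Int) : String :=
  match PySem.List.sorted [profits.1, profits.2.1, profits.2.2.1, profits.2.2.2] (fun x => x) true with
  | top :: rest => if top > rest.sum then "YES" else "NO"
  | [] => "NO"

def check_monopoly_alt (test_cases : List (Int × Int × Int × Int)) : List String :=
  test_cases.map monoVerdict

-- ===== PRECONDITION & SPEC =====
def Spec_check_monopoly (test_cases : List (Int × Int × Int × Int)) (out : List String) : Prop := out = check_monopoly_alt test_cases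
instance (test_cases : List (Int × Int × Int × Int)) (out : List String) : Decidable (Spec_check_monopoly test_cases out) := by unfold Spec_check_monopoly; infer_instance

-- ===== CLAIM =====
def Claim_equal_check_monopoly : Prop := ∀ (test_cases : List (Int × Int × Int × Int)), Dom_check_monopoly test_cases → Spec_check_monopoly test_cases (check_monopoly test_cases)

-- ===== LEMMAS AND PROOFS =====
theorem monoVerdict_eq (P Q R S : Int) :
    monoVerdict (P, Q, R, S) =
      (if P > Q+R+S ∨ Q > P+R+S ∨ R > P+Q+S ∨ S > P+Q+R then "YES" else "NO") := by
  unfold monoVerdict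
  have hperm := PySem.List.sorted_perm (xs := [P,Q,R,S]) (key := fun x => x) (rev := true)
  have hlen : (PySem.List.sorted [P,Q,R,S] (fun x=>x) true).length = 4 := by
    simp [hperm.length_eq]
  rcases hs : PySem.List.sorted [P,Q,R,S] (fun x=>x) true with _ | ⟨a, _ | ⟨b, _ | ⟨c, _ | ⟨d, rest⟩⟩⟩⟩ <;>
    rw [hs] at hlen <;> simp_all
  have hmax := PySem.List.key_head_sorted_rev_ge (xs := [P,Q,R,S]) (key := fun x => x) hs
  have hsum : a + b + c + d = P + Q + R + S := by
    have h := hperm.sum_eq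
    simp only [List.sum_cons, List.sum_nil] at h
    omega
  have ha : a ∈ [P,Q,R,S] := hperm.mem_iff.mp (by simp)
  have hP : P ≤ a := by simpa using hmax P (by simp)
  have hQ : Q ≤ a := by simpa using hmax Q (by simp)
  have hR : R ≤ a := by simpa using hmax R (by simp)
  have hS : S ≤ a := by simpa using hmax S (by simp)
  simp at ha
  have key : (b + (c + d) < a) ↔ (Q+R+S < P ∨ P+R+S < Q ∨ P+Q+S < R ∨ P+Q+R < S) := by
    rcases ha with h|h|h|h <;> omega
  rw [if_congr key rfl rfl]

theorem foldl_acc (l : List (Int × Int × Int × Int)) (acc : List String) :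
    l.foldl (fun results profits =>
      let P := profits.1; let Q := profits.2.1; let R := profits.2.2.1; let S := profits.2.2.2
      let sum_other_A := Q + R + S
      let sum_other_B := P + R + S
      let sum_other_C := P + Q + S
      let sum_other_D := P + Q + R
      if P > sum_other_A ∨ Q > sum_other_B ∨ R > sum_other_C ∨ S > sum_other_D then
        results ++ ["YES"]
      else
        results ++ ["NO"]) acc = acc ++ check_monopoly_alt l := by
  induction l generalizing acc with
  | nil => simp [check_monopoly_alt]
  | cons p t ih =>
    obtain ⟨P, Q, R, S⟩ := p
    simp only [List.foldl, check_monopoly_alt, List.map]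
    rw [ih, monoVerdict_eq]
    split_ifs <;> simp [check_monopoly_alt]

-- ===== VERDICT =====
theorem check_monopoly_spec : Claim_equal_check_monopoly := by
  intro tc _
  unfold Spec_check_monopoly check_monopoly
  rw [foldl_acc]
  simp
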